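-- pv_equiv track=rewrite | github.com/usuall/miniuptime | mini/library.py | trim_unchanged
-- ===== SOURCE A (Python) =====
-- def trim_unchanged(lines:list[str]) -> list[str]:
--
--     # tr の部分とその前後で分ける
--     pre = lines[:7]
--     trs = lines[7:-2]
--     post = lines[-2:]
--
--     # 省略部分を示すフィラー
--     filler = '<tr class="filler"><td class="diff_next"></td><td class="diff_header"></td><td nowrap="nowrap"></td><td class="diff_next"></td><td class="diff_header"></td><td nowrap="nowrap"></td></tr>'
--
--     minimal_lines = []
--     for i, line in enumerate(trs):
--
--         if ('class="diff_chg"' in line) or ('class="diff_sub"' in line) or ('class="diff_add"' in line):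
--             # 表示する行とそのインデックスを控えていく
--             minimal_lines.append([-1, filler])
--             minimal_lines.append([i, line])
--             if i == 0:
--                 # 先頭の行が変更されていた場合は冒頭にフィラー不要
--                 minimal_lines.pop(-2)
--             if len(minimal_lines) > 2 and minimal_lines[-3][0] + 1 == i:
--                 # 2つ前の行番号と今の行番号が1つしか違わない、すなわち行が連続している場合もフィラー不要
--                 minimal_lines.pop(-2)
--
--     return pre + [x[1] for x in minimal_lines] + post
-- ===== SOURCE B (Python) =====
-- FILLER = '<tr class="filler"><td class="diff_next"></td><td class="diff_header"></td><td nowrap="nowrap"></td><td class="diff_next"></td><td class="diff_header"></td><td nowrap="nowrap"></td></tr>'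
--
-- def trim_unchanged(lines: list[str]) -> list[str]:
--     out = []
--     prev = None  # index of the last changed row kept
--     for i, line in enumerate(lines[7:-2]):
--         if ('class="diff_chg"' in line) or ('class="diff_sub"' in line) or ('class="diff_add"' in line):
--             if i != 0 and prev != i - 1:
--                 out.append(FILLER)
--             out.append(line)
--             prev = i
--     return lines[:7] + out + lines[-2:]
-- ===== Notes on version B (the rewrite author's own statement) =====
-- stated objective: simpler
-- what changed: Replaces A's list of [index, content] pairs with its append-filler-then-pop(-2) undo trick and minimal_lines[-3][0] lookback by a single scalar 'previous changed row index' and direct appends of strings, deciding up front whether a filler is needed.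
import Mathlib
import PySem

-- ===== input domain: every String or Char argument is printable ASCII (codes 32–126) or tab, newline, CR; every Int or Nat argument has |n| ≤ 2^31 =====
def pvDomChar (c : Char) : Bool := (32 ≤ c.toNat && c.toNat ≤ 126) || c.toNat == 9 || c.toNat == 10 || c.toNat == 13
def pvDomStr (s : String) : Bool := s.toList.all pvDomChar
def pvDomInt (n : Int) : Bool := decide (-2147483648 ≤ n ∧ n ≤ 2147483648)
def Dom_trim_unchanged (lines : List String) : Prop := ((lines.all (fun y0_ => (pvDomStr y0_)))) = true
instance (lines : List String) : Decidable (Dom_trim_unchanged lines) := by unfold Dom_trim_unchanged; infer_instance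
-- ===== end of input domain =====

-- B replaces A's [index, content]-pair list with its append-then-pop undo tricks by a scalar
-- 'previous changed row' index and direct appends (objective: simpler); return values proved equal.

-- the filler row literal shared by both Python sources
def pvFiller : String := "<tr class=\"filler\"><td class=\"diff_next\"></td><td class=\"diff_header\"></td><td nowrap=\"nowrap\"></td><td class=\"diff_next\"></td><td class=\"diff_header\"></td><td nowrap=\"nowrap\"></td></tr>"

-- the changed-row test ('class="diff_chg" in line or …'), identical in both Python sources
def pvChanged (line : String) : Bool :=
  PySem.Str.isIn "class=\"diff_chg\"" line || PySem.Str.isIn "class=\"diff_sub\"" line ||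
    PySem.Str.isIn "class=\"diff_add\"" line

-- ===== PORT A =====
-- minimal_lines.pop(-2); the 'none' branch is unreachable (both call sites have length ≥ 2)
def pvPop2 (l : List (Int × String)) : List (Int × String) :=
  match PySem.List.pop? l (-2) with
  | some r => r.2
  | none => l

-- one iteration of A's loop body; the pyGetD default is unreachable (guarded by 2 < length,
-- mirroring Python's short-circuit 'len(minimal_lines) > 2 and minimal_lines[-3][0] + 1 == i')
def pvStepA (ml : List (Int × String)) (p : Int × String) : List (Int × String) :=
  if pvChanged p.2 then
    let l1 := ml ++ [(-1, pvFiller), (p.1, p.2)]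
    let l2 := if p.1 = 0 then pvPop2 l1 else l1
    if 2 < l2.length ∧ (PySem.List.pyGetD l2 (-3) (0, "")).1 + 1 = p.1 then pvPop2 l2 else l2
  else ml

def trim_unchanged (lines : List String) : List String :=
  let pre := PySem.List.slice lines none (some 7)
  let trs := PySem.List.slice lines (some 7) (some (-2))
  let post := PySem.List.slice lines (some (-2)) none
  let minimal_lines := (PySem.List.enumerate trs 0).foldl pvStepA []
  pre ++ minimal_lines.map (·.2) ++ post

-- ===== PORT B =====
-- one iteration of B's loop body over the state (prev, out)
def pvStepB (st : Option Int × List String) (p : Int × String) : Option Int × List String :=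
  if pvChanged p.2 then
    let out := if p.1 ≠ 0 ∧ st.1 ≠ some (p.1 - 1) then st.2 ++ [pvFiller] else st.2
    (some p.1, out ++ [p.2])
  else st

def trim_unchanged_alt (lines : List String) : List String :=
  let st := (PySem.List.enumerate (PySem.List.slice lines (some 7) (some (-2))) 0).foldl
      pvStepB (none, [])
  PySem.List.slice lines none (some 7) ++ st.2 ++ PySem.List.slice lines (some (-2)) none

-- ===== PRECONDITION & SPEC =====
def Spec_trim_unchanged (lines : List String) (out : List String) : Prop := out = trim_unchanged_alt lines
instance (lines : List String) (out : List String) : Decidable (Spec_trim_unchanged lines out) := by unfold Spec_trim_unchanged; infer_instance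

-- ===== CLAIM (what is proved, stated in full; the proofs are below) =====
def Claim_equal_trim_unchanged : Prop := ∀ (lines : List String), Dom_trim_unchanged lines → Spec_trim_unchanged lines (trim_unchanged lines)

-- ===== LEMMAS AND PROOFS =====

lemma pvPop2_append (u : List (Int × String)) (a b : Int × String) :
    pvPop2 (u ++ [a, b]) = u ++ [b] := by
  simp [pvPop2, PySem.List.pop?, PySem.List.pyIdx?]
  rw [List.eraseIdx_append_of_length_le (by simp)]
  simp

lemma pvGet3_append (u : List (Int × String)) (a b c d : Int × String) :
    PySem.List.pyGetD (u ++ [a, b, c]) (-3) d = a := by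
  simp [PySem.List.pyGetD, PySem.List.pyGet?, PySem.List.pyIdx?]

lemma pvStepA_cont (u : List (Int × String)) (j kk : Int) (s x : String)
    (hc : pvChanged x = true) (hk' : kk ≠ 0) :
    pvStepA (u ++ [(j, s)]) (kk, x)
      = if j + 1 = kk then u ++ [(j, s), (kk, x)]
        else u ++ [(j, s), (-1, pvFiller), (kk, x)] := by
  have hkf : (kk = 0) = False := eq_false hk'
  simp only [pvStepA, hc, if_true, hkf, if_false, List.append_assoc, List.cons_append,
    List.nil_append]
  rw [pvGet3_append]
  by_cases hj : j + 1 = kk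
  · rw [if_pos ⟨by simp, hj⟩, if_pos hj]
    have h2 : u ++ [(j, s), ((-1:Int), pvFiller), (kk, x)]
        = (u ++ [(j, s)]) ++ [((-1:Int), pvFiller), (kk, x)] := by simp
    rw [h2, pvPop2_append]; simp
  · rw [if_neg (fun h => hj h.2), if_neg hj]

lemma pvStepA_nil_zero (x : String) (hc : pvChanged x = true) :
    pvStepA [] ((0 : Int), x) = [((0 : Int), x)] := by
  have hp := pvPop2_append [] ((-1:Int), pvFiller) ((0:Int), x)
  simp only [List.nil_append] at hp
  simp only [pvStepA, hc, if_true, List.nil_append, hp]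
  rw [if_neg (by simp)]

lemma pvStepA_nil_pos (x : String) (kk : Int) (hc : pvChanged x = true) (hk' : kk ≠ 0) :
    pvStepA [] (kk, x) = [(-1, pvFiller), (kk, x)] := by
  have hkf : (kk = 0) = False := eq_false hk'
  simp only [pvStepA, hc, if_true, hkf, if_false, List.nil_append]
  rw [if_neg (by simp)]

-- loop invariant: A's pair list ends with the last kept changed row (index prev < next index k),
-- and B's output is A's list projected to its strings
lemma pvLoop (trs : List String) : ∀ (k : Nat) (ml : List (Int × String)) (prev : Option Int),
    (ml = [] ∧ prev = none ∨
      ∃ u j s, ml = u ++ [(j, s)] ∧ prev = some j ∧ 0 ≤ j ∧ j < (k : Int)) →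
    ((PySem.List.enumerate trs (k : Int)).foldl pvStepA ml).map (·.2)
      = ((PySem.List.enumerate trs (k : Int)).foldl pvStepB (prev, ml.map (·.2))).2 := by
  induction trs with
  | nil => intro k ml prev _; simp [PySem.List.enumerate]
  | cons x t ih =>
    intro k ml prev hinv
    rw [PySem.List.enumerate_cons]
    simp only [List.foldl_cons]
    have hcast : (k : Int) + 1 = ((k + 1 : Nat) : Int) := by push_cast; ring
    rw [hcast]
    by_cases hc : pvChanged x
    · rcases hinv with ⟨hml, hprev⟩ | ⟨u, j, s, hml, hprev, hj0, hjk⟩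
      · subst hml hprev
        by_cases hk : k = 0
        · subst hk
          have hB : pvStepB (none, List.map (·.2) ([] : List (Int × String)))
              (((0:Nat):Int), x) = (some 0, [x]) := by simp [pvStepB, hc]
          rw [show ((0:Nat):Int) = (0:Int) by norm_num] at *
          rw [pvStepA_nil_zero x hc, hB]
          have := ih 1 [((0:Int), x)] (some 0)
            (Or.inr ⟨[], 0, x, by simp, rfl, le_refl 0, by norm_num⟩)
          simpa using this
        · have hk' : ((k:Nat):Int) ≠ 0 := by exact_mod_cast hk
          have hB : pvStepB (none, List.map (·.2) ([] : List (Int × String)))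
              (((k:Nat):Int), x) = (some ((k:Nat):Int), [pvFiller, x]) := by
            simp [pvStepB, hc, hk]
          rw [pvStepA_nil_pos x _ hc hk', hB]
          have := ih (k+1) [(-1, pvFiller), (((k:Nat):Int), x)] (some ((k:Nat):Int))
            (Or.inr ⟨[(-1, pvFiller)], ((k:Nat):Int), x, by simp, rfl, by positivity,
              by push_cast; omega⟩)
          simpa using this
      · subst hml hprev
        have hk' : ((k:Nat):Int) ≠ 0 := by omega
        rw [pvStepA_cont u j _ s x hc hk']
        by_cases hj : j + 1 = ((k:Nat):Int)
        · have hB : pvStepB (some j, List.map (·.2) (u ++ [(j, s)])) (((k:Nat):Int), x)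
              = (some ((k:Nat):Int), List.map (·.2) (u ++ [(j, s)]) ++ [x]) := by
            have hj' : j = ((k:Nat):Int) - 1 := by omega
            simp [pvStepB, hc, hj']
          rw [if_pos hj, hB]
          have := ih (k+1) (u ++ [(j, s), (((k:Nat):Int), x)]) (some ((k:Nat):Int))
            (Or.inr ⟨u ++ [(j, s)], ((k:Nat):Int), x, by simp, rfl, by positivity,
              by push_cast; omega⟩)
          simpa using this
        · have hB : pvStepB (some j, List.map (·.2) (u ++ [(j, s)])) (((k:Nat):Int), x)
              = (some ((k:Nat):Int),
                  (List.map (·.2) (u ++ [(j, s)]) ++ [pvFiller]) ++ [x]) := by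
            have hj' : ¬ j = ((k:Nat):Int) - 1 := by omega
            have hk2 : ¬ k = 0 := by omega
            simp [pvStepB, hc, hk2, hj']
          rw [if_neg hj, hB]
          have := ih (k+1) (u ++ [(j, s), (-1, pvFiller), (((k:Nat):Int), x)])
            (some ((k:Nat):Int))
            (Or.inr ⟨u ++ [(j, s), (-1, pvFiller)], ((k:Nat):Int), x, by simp, rfl, by positivity,
              by push_cast; omega⟩)
          simpa using this
    · have hA : pvStepA ml (((k:Nat):Int), x) = ml := by simp [pvStepA, hc]
      have hB : pvStepB (prev, ml.map (·.2)) (((k:Nat):Int), x) = (prev, ml.map (·.2)) := by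
        simp [pvStepB, hc]
      rw [hA, hB]
      apply ih
      rcases hinv with ⟨hml, hprev⟩ | ⟨u, j, s, hml, hprev, hj0, hjk⟩
      · exact Or.inl ⟨hml, hprev⟩
      · exact Or.inr ⟨u, j, s, hml, hprev, hj0, by push_cast; omega⟩

-- ===== VERDICT (by name: the statement is the Claim_ definition above) =====
theorem trim_unchanged_spec : Claim_equal_trim_unchanged := by
  intro lines _
  unfold Spec_trim_unchanged trim_unchanged trim_unchanged_alt
  have h := pvLoop (PySem.List.slice lines (some 7) (some (-2))) 0 [] none (Or.inl ⟨rfl, rfl⟩)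
  simp only [Nat.cast_zero, List.map_nil] at h
  simp [h]
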